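-- pv_equiv track=rewrite | github.com/tjcccc/priests | priests/memory/extractor.py | _find_open
-- ===== SOURCE A (Python) =====
-- _OPEN_SAVE = "<memory_save"
--
-- _OPEN_APPEND = "<memory_append"
--
-- _OPEN_PROPOSAL = "<memory_proposal"
--
-- _OPEN_FORGET = "<memory_forget"
--
-- _OPEN_CONSOLIDATION = "<memory_consolidation"
--
-- _OPEN_SEARCH = "<search_query"
--
-- _OPEN_READ_FILE = "<read_file"
--
-- def _find_open(text: str) -> tuple[str | None, int, int]:
--     lo = text.lower()
--     best_type: str | None = None
--     best_start = len(text)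
--     best_end = -1
--
--     for btype, prefix in (
--         ("save", _OPEN_SAVE),
--         ("append", _OPEN_APPEND),
--         ("proposal", _OPEN_PROPOSAL),
--         ("forget", _OPEN_FORGET),
--         ("consolidation", _OPEN_CONSOLIDATION),
--         ("search", _OPEN_SEARCH),
--         ("read_file", _OPEN_READ_FILE),
--     ):
--         pos = lo.find(prefix)
--         if pos == -1 or pos >= best_start:
--             continue
--         gt = text.find(">", pos + len(prefix))
--         best_type = btype
--         best_start = pos
--         best_end = gt + 1 if gt != -1 else -1
--
--     return best_type, best_start, best_end
-- ===== SOURCE B (Python) =====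
-- _TAGS = (
--     ("save", "<memory_save"),
--     ("append", "<memory_append"),
--     ("proposal", "<memory_proposal"),
--     ("forget", "<memory_forget"),
--     ("consolidation", "<memory_consolidation"),
--     ("search", "<search_query"),
--     ("read_file", "<read_file"),
-- )
--
--
-- def _find_open(text: str) -> tuple[str | None, int, int]:
--     # Single left-to-right pass: every tag starts with '<', so jump from one
--     # '<' to the next and test the seven tag prefixes only there.
--     lo = text.lower()
--     i = lo.find("<")
--     while i != -1:
--         for btype, prefix in _TAGS:
--             if lo.startswith(prefix, i):
--                 gt = text.find(">", i + len(prefix))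
--                 return btype, i, (gt + 1 if gt != -1 else -1)
--         i = lo.find("<", i + 1)
--     return None, len(text), -1
-- ===== Notes on version B (the rewrite author's own statement) =====
-- stated objective: alternative
-- what changed: A runs seven independent whole-string searches (one lo.find per tag prefix) and keeps the minimum start; B makes a single left-to-right pass that jumps between occurrences of the common tag-opening character and tests the seven tag prefixes only at those positions, returning at the first hit.
import Mathlib
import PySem

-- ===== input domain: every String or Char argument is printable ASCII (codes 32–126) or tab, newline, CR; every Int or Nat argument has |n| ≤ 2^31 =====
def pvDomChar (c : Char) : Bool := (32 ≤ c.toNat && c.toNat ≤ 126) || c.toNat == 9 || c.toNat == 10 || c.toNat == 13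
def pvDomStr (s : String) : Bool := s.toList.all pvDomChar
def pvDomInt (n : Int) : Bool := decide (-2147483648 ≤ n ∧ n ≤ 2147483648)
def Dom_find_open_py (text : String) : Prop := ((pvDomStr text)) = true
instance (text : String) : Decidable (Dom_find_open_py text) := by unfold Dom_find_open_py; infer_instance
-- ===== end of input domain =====

-- B replaces A's seven whole-string searches by one left-to-right pass that jumps
-- between occurrences of the common tag-opening character and tests the seven tag
-- prefixes only there (objective: alternative single-pass algorithm).

-- ===== PORT A =====
def find_open_py (text : String) : Option String × Int × Int :=
  let lo := PySem.Str.lower text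
  ([("save", "<memory_save"), ("append", "<memory_append"), ("proposal", "<memory_proposal"),
     ("forget", "<memory_forget"), ("consolidation", "<memory_consolidation"),
     ("search", "<search_query"), ("read_file", "<read_file")] : List (String × String)).foldl
    (fun st bp =>
      let pos := PySem.Str.find lo bp.2
      if pos = -1 ∨ st.2.1 ≤ pos then st
      else
        let gt := PySem.Str.findFrom text ">" (pos + (PySem.Str.len bp.2 : Int)) none
        (some bp.1, pos, if gt ≠ -1 then gt + 1 else -1))
    (none, (PySem.Str.len text : Int), -1)

-- ===== PORT B =====
-- module constant _TAGS of Source B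
def pvTags : List (String × String) :=
  [("save", "<memory_save"), ("append", "<memory_append"), ("proposal", "<memory_proposal"),
   ("forget", "<memory_forget"), ("consolidation", "<memory_consolidation"),
   ("search", "<search_query"), ("read_file", "<read_file")]

-- the inner `for btype, prefix in _TAGS: if lo.startswith(prefix, i): …` of Source B:
-- first tag whose prefix matches at position i of lo
def pvFirstTag (lo : List Char) (i : Nat) : Option (String × String) :=
  pvTags.find? (fun bp => PySem.Chars.startswith (lo.drop i) bp.2.toList)

-- termination facts for the while loop of Source B (i strictly advances past each '<')
theorem pvFindLt_bounds {lo : List Char} {i : Nat} (hi : i ≤ lo.length)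
    (hj : PySem.Chars.findFrom lo ['<'] (i : Int) none ≠ -1) :
    (i : Int) ≤ PySem.Chars.findFrom lo ['<'] (i : Int) none ∧
      (PySem.Chars.findFrom lo ['<'] (i : Int) none).toNat < lo.length := by
  obtain ⟨h1, h2, -⟩ := PySem.Chars.findFrom_natCast_spec lo ['<'] i hi hj
  refine ⟨h1, ?_⟩
  rcases h2 with ⟨t, ht⟩
  have : lo.drop (PySem.Chars.findFrom lo ['<'] (i : Int) none).toNat ≠ [] := by
    rw [← ht]; simp
  have h3 := List.length_pos_iff.mpr this
  have h4 : (lo.drop (PySem.Chars.findFrom lo ['<'] (i : Int) none).toNat).length = lo.length - (PySem.Chars.findFrom lo ['<'] (i : Int) none).toNat := List.length_drop ..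
  omega

-- the while loop of Source B: find the next '<' from position i, test the seven tags there,
-- else continue after it
def pvGoB (t lo : List Char) (i : Nat) (hi : i ≤ lo.length) : Option String × Int × Int :=
  let j := PySem.Chars.findFrom lo ['<'] (i : Int) none
  if hj : j = -1 then (none, (t.length : Int), -1)
  else
    match pvFirstTag lo j.toNat with
    | some bp =>
        let gt := PySem.Chars.findFrom t ['>'] (j + (PySem.Str.len bp.2 : Int)) none
        (some bp.1, j, if gt ≠ -1 then gt + 1 else -1)
    | none => pvGoB t lo (j.toNat + 1) (by have := pvFindLt_bounds hi hj; omega)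
termination_by lo.length - i
decreasing_by
  have := pvFindLt_bounds hi hj
  omega

def find_open_py_alt (text : String) : Option String × Int × Int :=
  pvGoB text.toList (PySem.Chars.lower text.toList) 0 (Nat.zero_le _)

-- ===== PRECONDITION & SPEC =====
def Spec_find_open_py (text : String) (out : Option String × Int × Int) : Prop := out = find_open_py_alt text
instance (text : String) (out : Option String × Int × Int) : Decidable (Spec_find_open_py text out) := by unfold Spec_find_open_py; infer_instance

-- ===== CLAIM (what is proved, stated in full; the proofs are below) =====
def Claim_equal_find_open_py : Prop := ∀ (text : String), Dom_find_open_py text → Spec_find_open_py text (find_open_py text)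

-- ===== LEMMAS AND PROOFS =====

-- A's fold, generalised: each tag searched from start position k (k = 0 is A itself)
def pvStepFrom (t lo : List Char) (k : Nat) (st : Option String × Int × Int) (bp : String × String) :
    Option String × Int × Int :=
  let pos := PySem.Chars.findFrom lo bp.2.toList (k : Int) none
  if pos = -1 ∨ st.2.1 ≤ pos then st
  else
    let gt := PySem.Chars.findFrom t ['>'] (pos + (PySem.Str.len bp.2 : Int)) none
    (some bp.1, pos, if gt ≠ -1 then gt + 1 else -1)

def pvFoldFrom (t lo : List Char) (k : Nat) : Option String × Int × Int :=
  pvTags.foldl (pvStepFrom t lo k) (none, (t.length : Int), -1)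

theorem pv_tags_head : ∀ bp ∈ pvTags, ['<'] <+: bp.2.toList := by decide

-- port A equals the k = 0 generalised fold (bridge String → List Char)
theorem pv_bridge_A (text : String) :
    find_open_py text = pvFoldFrom text.toList (PySem.Chars.lower text.toList) 0 := by
  unfold find_open_py pvFoldFrom pvTags
  have hinit : PySem.Str.len text = ((text.toList.length : Nat) : Int) := by simp [pysem]
  rw [hinit]
  refine List.foldl_ext _ _ _ ?_
  intro st bp _
  unfold pvStepFrom
  simp only [pysem, Nat.cast_zero]
  rfl

theorem pv_drop_infix {q lo : List Char} {m n : Nat} (hmn : m ≤ n) (h : q <+: lo.drop n) :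
    q <:+: lo.drop m :=
  h.isInfix.trans (List.drop_suffix_drop_left lo hmn).isInfix

-- if q never matches in [k, k'), searching from k equals searching from k'
theorem pv_shift (lo q : List Char) (k k' : Nat) (hk' : k' ≤ lo.length) (hkk : k ≤ k')
    (hno : ∀ i, k ≤ i → i < k' → ¬ q <+: lo.drop i) :
    PySem.Chars.findFrom lo q (k : Int) none = PySem.Chars.findFrom lo q (k' : Int) none := by
  have hk : k ≤ lo.length := hkk.trans hk'
  by_cases h : PySem.Chars.findFrom lo q (k : Int) none = -1
  · rw [h]
    have h1 := (PySem.Chars.findFrom_natCast_eq_neg_one_iff lo q k hk).mp h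
    have h2 : ¬ q <:+: lo.drop k' := fun hinf =>
      h1 (hinf.trans (List.drop_suffix_drop_left lo hkk).isInfix)
    exact ((PySem.Chars.findFrom_natCast_eq_neg_one_iff lo q k' hk').mpr h2).symm
  · obtain ⟨h1, h2, h3⟩ := PySem.Chars.findFrom_natCast_spec lo q k hk h
    have ha0 : (0 : Int) ≤ PySem.Chars.findFrom lo q (k : Int) none :=
      le_trans (Int.natCast_nonneg k) h1
    have hk'a : k' ≤ (PySem.Chars.findFrom lo q (k : Int) none).toNat := by
      by_contra hlt
      exact hno (PySem.Chars.findFrom lo q (k : Int) none).toNat (by omega) (by omega) h2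
    have hb : PySem.Chars.findFrom lo q (k' : Int) none ≠ -1 := by
      rw [Ne, PySem.Chars.findFrom_natCast_eq_neg_one_iff lo q k' hk']
      exact not_not_intro (pv_drop_infix hk'a h2)
    obtain ⟨g1, g2, g3⟩ := PySem.Chars.findFrom_natCast_spec lo q k' hk' hb
    have hb0 : (0 : Int) ≤ PySem.Chars.findFrom lo q (k' : Int) none :=
      le_trans (Int.natCast_nonneg k') g1
    have e1 : ¬ (PySem.Chars.findFrom lo q (k : Int) none).toNat
        < (PySem.Chars.findFrom lo q (k' : Int) none).toNat := fun hl =>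
      g3 (PySem.Chars.findFrom lo q (k : Int) none).toNat (by omega) hl h2
    have e2 : ¬ (PySem.Chars.findFrom lo q (k' : Int) none).toNat
        < (PySem.Chars.findFrom lo q (k : Int) none).toNat := fun hl =>
      h3 (PySem.Chars.findFrom lo q (k' : Int) none).toNat (by omega) hl g2
    omega

-- any tag match position (searching from k) is at least jn when no '<' occurs in [k, jn)
theorem pv_pos_ge (lo q : List Char) (k jn : Nat) (hk : k ≤ lo.length)
    (hq : ['<'] <+: q)
    (hmin : ∀ i, k ≤ i → i < jn → ¬ ['<'] <+: lo.drop i)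
    (h : PySem.Chars.findFrom lo q (k : Int) none ≠ -1) :
    (jn : Int) ≤ PySem.Chars.findFrom lo q (k : Int) none := by
  obtain ⟨h1, h2, -⟩ := PySem.Chars.findFrom_natCast_spec lo q k hk h
  have ha0 : (0 : Int) ≤ PySem.Chars.findFrom lo q (k : Int) none :=
    le_trans (Int.natCast_nonneg k) h1
  have : ¬ (PySem.Chars.findFrom lo q (k : Int) none).toNat < jn := fun hl =>
    hmin (PySem.Chars.findFrom lo q (k : Int) none).toNat (by omega) hl (hq.trans h2)
  omega

-- if q matches exactly at jn and not before (from k), the search from k finds jn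
theorem pv_pos_eq (lo q : List Char) (k jn : Nat) (hk : k ≤ lo.length) (hkj : k ≤ jn)
    (hq : ['<'] <+: q)
    (hmin : ∀ i, k ≤ i → i < jn → ¬ ['<'] <+: lo.drop i)
    (hat : q <+: lo.drop jn) :
    PySem.Chars.findFrom lo q (k : Int) none = (jn : Int) := by
  have hne : PySem.Chars.findFrom lo q (k : Int) none ≠ -1 := by
    rw [Ne, PySem.Chars.findFrom_natCast_eq_neg_one_iff lo q k hk]
    exact not_not_intro (pv_drop_infix hkj hat)
  have hge := pv_pos_ge lo q k jn hk hq hmin hne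
  obtain ⟨h1, h2, h3⟩ := PySem.Chars.findFrom_natCast_spec lo q k hk hne
  have ha0 : (0 : Int) ≤ PySem.Chars.findFrom lo q (k : Int) none :=
    le_trans (Int.natCast_nonneg k) h1
  have : ¬ jn < (PySem.Chars.findFrom lo q (k : Int) none).toNat := fun hl =>
    h3 jn hkj hl hat
  omega

-- once best_start ≤ every remaining match position, the fold is inert
theorem pv_fold_inert (t lo : List Char) (k jn : Nat) (hk : k ≤ lo.length)
    (hmin : ∀ i, k ≤ i → i < jn → ¬ ['<'] <+: lo.drop i)
    (tags : List (String × String)) (hheads : ∀ bp ∈ tags, ['<'] <+: bp.2.toList)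
    (st : Option String × Int × Int) (hst : st.2.1 ≤ (jn : Int)) :
    tags.foldl (pvStepFrom t lo k) st = st := by
  induction tags with
  | nil => rfl
  | cons bp rest ih =>
    have hhead := hheads bp List.mem_cons_self
    have hrest : ∀ q ∈ rest, ['<'] <+: q.2.toList := fun q hq => hheads q (List.mem_cons_of_mem _ hq)
    have hskip : pvStepFrom t lo k st bp = st := by
      unfold pvStepFrom
      by_cases hp : PySem.Chars.findFrom lo bp.2.toList (k : Int) none = -1
      · simp [hp]
      · have h1 := pv_pos_ge lo bp.2.toList k jn hk hhead hmin hp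
        have h2 : st.2.1 ≤ PySem.Chars.findFrom lo bp.2.toList (k : Int) none := le_trans hst h1
        simp [h2]
    rw [List.foldl_cons, hskip]
    exact ih hrest

-- no tag matches at or before jn: the fold from k equals the fold from jn + 1
theorem pv_fold_shift (t lo : List Char) (k jn : Nat) (hk : k ≤ jn + 1) (hj : jn < lo.length)
    (hmin : ∀ i, k ≤ i → i < jn → ¬ ['<'] <+: lo.drop i)
    (tags : List (String × String)) (hheads : ∀ bp ∈ tags, ['<'] <+: bp.2.toList)
    (hnone : tags.find? (fun bp => PySem.Chars.startswith (lo.drop jn) bp.2.toList) = none)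
    (st : Option String × Int × Int) :
    tags.foldl (pvStepFrom t lo k) st = tags.foldl (pvStepFrom t lo (jn + 1)) st := by
  induction tags generalizing st with
  | nil => rfl
  | cons bp rest ih =>
    have hhead := hheads bp List.mem_cons_self
    have hrest : ∀ q ∈ rest, ['<'] <+: q.2.toList := fun q hq => hheads q (List.mem_cons_of_mem _ hq)
    by_cases hpred : PySem.Chars.startswith (lo.drop jn) bp.2.toList = true
    · simp [hpred] at hnone
    · have hnrest : rest.find? (fun bp => PySem.Chars.startswith (lo.drop jn) bp.2.toList) = none := by
        simpa [List.find?_cons, hpred] using hnone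
      have hnomatch : ∀ i, k ≤ i → i < jn + 1 → ¬ bp.2.toList <+: lo.drop i := by
        intro i h1 h2 hmat
        rcases Nat.lt_or_ge i jn with hlt | hge
        · exact hmin i h1 hlt (hhead.trans hmat)
        · have : i = jn := by omega
          subst this
          exact hpred ((PySem.Chars.startswith_iff _ _).mpr hmat)
      have hposeq : PySem.Chars.findFrom lo bp.2.toList (k : Int) none
          = PySem.Chars.findFrom lo bp.2.toList ((jn + 1 : Nat) : Int) none :=
        pv_shift lo bp.2.toList k (jn + 1) (by omega) hk hnomatch
      have hstep : pvStepFrom t lo k st bp = pvStepFrom t lo (jn + 1) st bp := by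
        unfold pvStepFrom
        rw [hposeq]
      rw [List.foldl_cons, List.foldl_cons, hstep]
      exact ih hrest hnrest _

-- the first tag matching at jn wins the fold
theorem pv_fold_hit (t lo : List Char) (k jn : Nat) (hk : k ≤ jn) (hj : jn < lo.length)
    (hmin : ∀ i, k ≤ i → i < jn → ¬ ['<'] <+: lo.drop i)
    (tags : List (String × String)) (hheads : ∀ bp ∈ tags, ['<'] <+: bp.2.toList)
    (bp : String × String)
    (hfind : tags.find? (fun bp => PySem.Chars.startswith (lo.drop jn) bp.2.toList) = some bp)
    (st : Option String × Int × Int) (hst : (jn : Int) < st.2.1) :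
    tags.foldl (pvStepFrom t lo k) st =
      (some bp.1, (jn : Int),
        let gt := PySem.Chars.findFrom t ['>'] ((jn : Int) + (PySem.Str.len bp.2 : Int)) none
        if gt ≠ -1 then gt + 1 else -1) := by
  induction tags generalizing st with
  | nil => simp at hfind
  | cons bp' rest ih =>
    have hhead := hheads bp' List.mem_cons_self
    have hrest : ∀ q ∈ rest, ['<'] <+: q.2.toList := fun q hq => hheads q (List.mem_cons_of_mem _ hq)
    by_cases hpred : PySem.Chars.startswith (lo.drop jn) bp'.2.toList = true
    · have hbp : bp' = bp := by
        simpa [List.find?_cons, hpred] using hfind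
      subst hbp
      have hat : bp'.2.toList <+: lo.drop jn := (PySem.Chars.startswith_iff _ _).mp hpred
      have hpos : PySem.Chars.findFrom lo bp'.2.toList (k : Int) none = (jn : Int) :=
        pv_pos_eq lo bp'.2.toList k jn (by omega) hk hhead hmin hat
      have hupd : pvStepFrom t lo k st bp' =
          (some bp'.1, (jn : Int),
            let gt := PySem.Chars.findFrom t ['>'] ((jn : Int) + (PySem.Str.len bp'.2 : Int)) none
            if gt ≠ -1 then gt + 1 else -1) := by
        unfold pvStepFrom
        rw [hpos]
        have hcond : ¬ ((jn : Int) = -1 ∨ st.2.1 ≤ (jn : Int)) := by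
          push Not
          exact ⟨by omega, by omega⟩
        simp only [hcond, if_neg, not_false_iff]
      rw [List.foldl_cons, hupd]
      exact pv_fold_inert t lo k jn (by omega) hmin rest hrest _ (by simp)
    · have hfrest : rest.find? (fun bp => PySem.Chars.startswith (lo.drop jn) bp.2.toList) = some bp := by
        simpa [List.find?_cons, hpred] using hfind
      by_cases hp : PySem.Chars.findFrom lo bp'.2.toList (k : Int) none = -1
      · have hskip : pvStepFrom t lo k st bp' = st := by
          unfold pvStepFrom
          simp [hp]
        rw [List.foldl_cons, hskip]
        exact ih hrest hfrest st hst
      · have hge := pv_pos_ge lo bp'.2.toList k jn (by omega) hhead hmin hp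
        have hgt : (jn : Int) < PySem.Chars.findFrom lo bp'.2.toList (k : Int) none := by
          rcases lt_or_eq_of_le hge with h | h
          · exact h
          · exfalso
            obtain ⟨-, h2, -⟩ := PySem.Chars.findFrom_natCast_spec lo bp'.2.toList k (by omega) hp
            rw [← h] at h2
            simp only [Int.toNat_natCast] at h2
            exact hpred ((PySem.Chars.startswith_iff _ _).mpr h2)
        by_cases hle : st.2.1 ≤ PySem.Chars.findFrom lo bp'.2.toList (k : Int) none
        · have hskip : pvStepFrom t lo k st bp' = st := by
            unfold pvStepFrom
            simp [hle]
          rw [List.foldl_cons, hskip]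
          exact ih hrest hfrest st hst
        · have hupd : pvStepFrom t lo k st bp' =
              (some bp'.1, PySem.Chars.findFrom lo bp'.2.toList (k : Int) none,
                let gt := PySem.Chars.findFrom t ['>']
                  (PySem.Chars.findFrom lo bp'.2.toList (k : Int) none + (PySem.Str.len bp'.2 : Int)) none
                if gt ≠ -1 then gt + 1 else -1) := by
            unfold pvStepFrom
            have hcond : ¬ (PySem.Chars.findFrom lo bp'.2.toList (k : Int) none = -1
                ∨ st.2.1 ≤ PySem.Chars.findFrom lo bp'.2.toList (k : Int) none) := by
              push Not
              exact ⟨hp, by omega⟩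
            simp only [hcond, if_neg, not_false_iff]
          rw [List.foldl_cons, hupd]
          exact ih hrest hfrest _ (by simpa using hgt)

-- if every tag search from k fails, every fold step is a no-op
theorem pv_fold_skip_all (t lo : List Char) (k : Nat) (tags : List (String × String))
    (h : ∀ bp ∈ tags, PySem.Chars.findFrom lo bp.2.toList (k : Int) none = -1)
    (st : Option String × Int × Int) : tags.foldl (pvStepFrom t lo k) st = st := by
  induction tags generalizing st with
  | nil => rfl
  | cons bp rest ih =>
    have hhead := h bp List.mem_cons_self
    have hskip : pvStepFrom t lo k st bp = st := by
      unfold pvStepFrom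
      simp [hhead]
    rw [List.foldl_cons, hskip]
    exact ih (fun q hq => h q (List.mem_cons_of_mem _ hq)) st

-- no '<' from k onward: every tag search from k fails and the fold returns the initial state
theorem pv_fold_empty (t lo : List Char) (k : Nat) (hk : k ≤ lo.length)
    (hno : ¬ ['<'] <:+: lo.drop k) :
    pvFoldFrom t lo k = (none, (t.length : Int), -1) := by
  have hneg : ∀ bp ∈ pvTags, PySem.Chars.findFrom lo bp.2.toList (k : Int) none = -1 := by
    intro bp hbp
    rw [PySem.Chars.findFrom_natCast_eq_neg_one_iff lo _ k hk]
    intro hinf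
    apply hno
    rw [List.singleton_infix_iff]
    exact hinf.subset ((pv_tags_head bp hbp).subset (by simp))
  unfold pvFoldFrom
  exact pv_fold_skip_all t lo k pvTags hneg _

-- if '<' does not occur from k on, both sides are the no-match answer
theorem pv_both_empty (t lo : List Char) (k : Nat) (hk : k ≤ lo.length)
    (hj : PySem.Chars.findFrom lo ['<'] (k : Int) none = -1) :
    pvFoldFrom t lo k = (none, (t.length : Int), -1) := by
  have hno := (PySem.Chars.findFrom_natCast_eq_neg_one_iff lo ['<'] k hk).mp hj
  exact pv_fold_empty t lo k hk hno

-- main loop invariant: B's while loop from i computes A's generalised fold from i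
theorem pv_main (t lo : List Char) (hlen : lo.length = t.length) :
    ∀ n k (hk : k ≤ lo.length), lo.length - k ≤ n → pvGoB t lo k hk = pvFoldFrom t lo k := by
  intro n
  induction n with
  | zero =>
    intro k hk hb
    have hke : k = lo.length := by omega
    have hj : PySem.Chars.findFrom lo ['<'] (k : Int) none = -1 := by
      rw [PySem.Chars.findFrom_natCast_eq_neg_one_iff lo _ k hk]
      subst hke
      simp
    rw [pvGoB]
    simp only [hj, dif_pos]
    exact (pv_both_empty t lo k hk hj).symm
  | succ n ih =>
    intro k hk hb
    by_cases hj : PySem.Chars.findFrom lo ['<'] (k : Int) none = -1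
    · rw [pvGoB]
      simp only [hj, dif_pos]
      exact (pv_both_empty t lo k hk hj).symm
    · obtain ⟨h1, hjlt⟩ := pvFindLt_bounds hk hj
      obtain ⟨-, h2, h3⟩ := PySem.Chars.findFrom_natCast_spec lo ['<'] k hk hj
      have hj0 : (0 : Int) ≤ PySem.Chars.findFrom lo ['<'] (k : Int) none :=
        le_trans (Int.natCast_nonneg k) h1
      rcases hft : pvFirstTag lo (PySem.Chars.findFrom lo ['<'] (k : Int) none).toNat
          with - | bp
      · rw [pvGoB]
        simp only [hj, dif_neg, not_false_iff, hft]
        rw [ih ((PySem.Chars.findFrom lo ['<'] (k : Int) none).toNat + 1) (by omega) (by omega)]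
        unfold pvFoldFrom
        unfold pvFirstTag at hft
        exact (pv_fold_shift t lo k (PySem.Chars.findFrom lo ['<'] (k : Int) none).toNat
          (by omega) hjlt h3 pvTags pv_tags_head hft _).symm
      · rw [pvGoB]
        simp only [hj, dif_neg, not_false_iff, hft]
        unfold pvFirstTag at hft
        unfold pvFoldFrom
        rw [pv_fold_hit t lo k (PySem.Chars.findFrom lo ['<'] (k : Int) none).toNat
          (by omega) hjlt h3 pvTags pv_tags_head bp hft _ (by push_cast; omega)]
        rw [Int.toNat_of_nonneg hj0]

theorem pv_len_lower (s : List Char) : (PySem.Chars.lower s).length = s.length := by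
  simp [PySem.Chars.lower]

-- ===== VERDICT (by name: the statement is the Claim_ definition above) =====
theorem find_open_py_spec : Claim_equal_find_open_py := by
  intro text _
  unfold Spec_find_open_py
  rw [pv_bridge_A]
  have hlen : (PySem.Chars.lower text.toList).length = text.toList.length := pv_len_lower _
  rw [← pv_main text.toList (PySem.Chars.lower text.toList) hlen
        (PySem.Chars.lower text.toList).length 0 (Nat.zero_le _) (by omega)]
  rfl
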